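-- pv_equiv track=rewrite | github.com/kjcolley7/CTF-WriteUps | 2022/maple/vm-1_and_2/emu.py | xxdascii
-- ===== SOURCE A (Python) =====
-- def xxdascii(data):
-- 	s = []
-- 	for c in data:
-- 		if 0x20 <= c <= 0x7e:
-- 			s.append(chr(c))
-- 		else:
-- 			s.append('.')
-- 	return "".join(s)
-- ===== SOURCE B (Python) =====
-- def xxdascii(data):
-- 	parts = []
-- 	i, n = 0, len(data)
-- 	while i < n:
-- 		j = i
-- 		if 0x20 <= data[i] <= 0x7e:
-- 			while j < n and 0x20 <= data[j] <= 0x7e: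
-- 				j += 1
-- 			parts.append(bytes(data[i:j]).decode('ascii'))
-- 		else:
-- 			while j < n and not (0x20 <= data[j] <= 0x7e):
-- 				j += 1
-- 			parts.append('.' * (j - i))
-- 		i = j
-- 	return ''.join(parts)
-- ===== Notes on version B (the rewrite author's own statement) =====
-- stated objective: alternative
-- what changed: Replaces A's per-byte branch-and-append loop with a run-length grouping algorithm: the input is scanned as maximal runs of printable / non-printable bytes, each printable run decoded in one bytes().decode('ascii') call and each non-printable run emitted as '.'*len at once.
import Mathlib
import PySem

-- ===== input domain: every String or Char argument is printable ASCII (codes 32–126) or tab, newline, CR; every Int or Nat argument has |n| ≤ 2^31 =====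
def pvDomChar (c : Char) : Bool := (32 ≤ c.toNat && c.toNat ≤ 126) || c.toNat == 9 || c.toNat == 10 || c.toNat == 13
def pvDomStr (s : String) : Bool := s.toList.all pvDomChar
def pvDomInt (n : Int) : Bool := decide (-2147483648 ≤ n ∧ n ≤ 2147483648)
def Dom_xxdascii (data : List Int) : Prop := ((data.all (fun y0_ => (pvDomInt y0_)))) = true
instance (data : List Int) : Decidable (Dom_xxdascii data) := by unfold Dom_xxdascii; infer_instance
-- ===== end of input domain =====

-- B replaces A's per-byte branch-and-append loop by a run-length grouping scan:
-- maximal printable runs are decoded at once, non-printable runs become '.'*len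
-- (alternative decomposition; same O(n) cost).

-- ===== PORT A =====
def xxdascii (data : List Int) : String :=
  let s := data.foldl
    (fun s c => s ++ [if 0x20 ≤ c ∧ c ≤ 0x7e then String.ofList [Char.ofNat c.toNat] else "."]) []
  PySem.Str.join "" s

-- ===== PORT B =====
-- the printable test of Source B's two inner while-scans
def pvPrintable (c : Int) : Bool := decide (0x20 ≤ c ∧ c ≤ 0x7e)

-- Source B's outer while loop: split off one maximal run per step (the inner
-- 'while j < n and …' scans are takeWhile/dropWhile on the remaining list)
def pvRuns : List Int → List String
  | [] => []
  | c :: rest =>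
    if pvPrintable c then
      String.ofList (((c :: rest).takeWhile pvPrintable).map (fun x => Char.ofNat x.toNat))
        :: pvRuns ((c :: rest).dropWhile pvPrintable)
    else
      String.ofList (List.replicate ((c :: rest).takeWhile (fun x => !pvPrintable x)).length '.')
        :: pvRuns ((c :: rest).dropWhile (fun x => !pvPrintable x))
termination_by l => l.length
decreasing_by
  · simp only [List.dropWhile_cons, *, if_pos]
    exact Nat.lt_succ_of_le (List.length_dropWhile_le _ _)
  · simp only [List.dropWhile_cons, *]
    simp_all
    exact List.length_dropWhile_le _ _

def xxdascii_alt (data : List Int) : String :=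
  PySem.Str.join "" (pvRuns data)

-- ===== PRECONDITION & SPEC =====
def Spec_xxdascii (data : List Int) (out : String) : Prop := out = xxdascii_alt data
instance (data : List Int) (out : String) : Decidable (Spec_xxdascii data out) := by unfold Spec_xxdascii; infer_instance

-- ===== CLAIM (what is proved, stated in full; the proofs are below) =====
def Claim_equal_xxdascii : Prop := ∀ (data : List Int), Dom_xxdascii data → Spec_xxdascii data (xxdascii data)

-- ===== LEMMAS AND PROOFS =====
-- the common per-byte character both programs produce
def pvGlyph (c : Int) : Char := if pvPrintable c then Char.ofNat c.toNat else '.'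

theorem pv_join_nil_flatten (l : List (List Char)) :
    PySem.Chars.join [] l = l.flatten := by
  induction l with
  | nil => rfl
  | cons x xs ih =>
    cases xs with
    | nil => simp [PySem.Chars.join, List.intercalate]
    | cons y ys =>
      simp only [PySem.Chars.join, List.intercalate] at *
      simp_all [List.intersperse]

-- B's runs, flattened, give the per-byte map
theorem pv_runs_chars (data : List Int) :
    ((pvRuns data).map String.toList).flatten = data.map pvGlyph := by
  induction data using pvRuns.induct with
  | case1 => rw [pvRuns]; rfl
  | case2 c rest h ih =>
    rw [pvRuns, if_pos h]
    conv_rhs => rw [← List.takeWhile_append_dropWhile (p := pvPrintable) (l := c :: rest)]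
    rw [List.map_cons, List.flatten_cons, ih, List.map_append]
    congr 1
    rw [String.toList_ofList]
    exact List.map_congr_left (fun x hx => by
      have := List.mem_takeWhile_imp hx
      simp [pvGlyph, this])
  | case3 c rest h ih =>
    rw [pvRuns, if_neg h]
    conv_rhs => rw [← List.takeWhile_append_dropWhile (p := fun x => !pvPrintable x) (l := c :: rest)]
    rw [List.map_cons, List.flatten_cons, ih, List.map_append]
    congr 1
    rw [String.toList_ofList]
    symm
    rw [List.eq_replicate_iff]
    refine ⟨by simp, ?_⟩
    intro b hb
    obtain ⟨x, hx, rfl⟩ := List.mem_map.mp hb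
    have := List.mem_takeWhile_imp hx
    simp only [Bool.not_eq_true'] at this
    simp [pvGlyph, this]

-- A's pieces are the singleton strings of the same characters
theorem pv_a_chars (data : List Int) :
    ((data.map (fun c => if 0x20 ≤ c ∧ c ≤ 0x7e then String.ofList [Char.ofNat c.toNat] else ".")).map
        String.toList) = data.map (fun c => [pvGlyph c]) := by
  rw [List.map_map]
  exact List.map_congr_left (fun c _ => by
    by_cases h : 0x20 ≤ c ∧ c ≤ 0x7e <;>
      simp [h, pvGlyph, pvPrintable, String.toList_ofList])

-- ===== VERDICT (by name: the statement is the Claim_ definition above) =====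
theorem xxdascii_spec : Claim_equal_xxdascii := by
  intro data _
  unfold Spec_xxdascii xxdascii xxdascii_alt
  rw [PySem.List.foldl_append_singleton_eq_map, List.nil_append]
  have h0 : ("" : String).toList = ([] : List Char) := rfl
  have hA : (PySem.Str.join ""
      (data.map (fun c => if 0x20 ≤ c ∧ c ≤ 0x7e then String.ofList [Char.ofNat c.toNat] else "."))).toList
      = data.map pvGlyph := by
    rw [PySem.Str.toList_join, h0, pv_a_chars]
    simpa using PySem.Chars.join_nil_singletons (data.map pvGlyph)
  have hB : (PySem.Str.join "" (pvRuns data)).toList = data.map pvGlyph := by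
    rw [PySem.Str.toList_join, h0, pv_join_nil_flatten, pv_runs_chars]
  exact String.toList_inj.mp (hA.trans hB.symm)
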